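-- pv_equiv track=rewrite | github.com/OmaRowe/algorithm-study | 11_动态规划/lis最长上升子序列问题/LIS模板.py | caldp
-- ===== SOURCE A (Python) =====
-- from typing import List, Tuple
-- from bisect import bisect_left, bisect_right
--
-- def caldp(nums: List[int], isStrict=True) -> List[int]:
--     """求以每个位置为结尾的LIS长度(包括自身)"""
--     if not nums:
--         return []
--
--     n = len(nums)
--     res = [0] * n
--     lis = []
--     for i in range(n):
--         pos = bisect_left(lis, nums[i]) if isStrict else bisect_right(lis, nums[i])
--         if pos == len(lis):
--             lis.append(nums[i])
--             res[i] = len(lis)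
--         else:
--             lis[pos] = nums[i]
--             res[i] = pos + 1
--     return res
-- ===== SOURCE B (Python) =====
-- def caldp(nums, isStrict=True):
--     """求以每个位置为结尾的LIS长度(包括自身) — classic O(n^2) DP instead of patience sorting."""
--     res = []
--     prev = []  # (value, dp-length) for each processed element, in order
--     for x in nums:
--         best = 0
--         for v, d in prev:
--             if (v < x if isStrict else v <= x) and d > best:
--                 best = d
--         res.append(best + 1)
--         prev.append((x, best + 1))
--     return res
-- ===== Notes on version B (the rewrite author's own statement) =====
-- stated objective: alternative
-- what changed: Replaced the patience-sorting tails array with bisect insertion by the classic quadratic DP that rescans all earlier elements to find the best extendable predecessor length.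
import Mathlib
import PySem

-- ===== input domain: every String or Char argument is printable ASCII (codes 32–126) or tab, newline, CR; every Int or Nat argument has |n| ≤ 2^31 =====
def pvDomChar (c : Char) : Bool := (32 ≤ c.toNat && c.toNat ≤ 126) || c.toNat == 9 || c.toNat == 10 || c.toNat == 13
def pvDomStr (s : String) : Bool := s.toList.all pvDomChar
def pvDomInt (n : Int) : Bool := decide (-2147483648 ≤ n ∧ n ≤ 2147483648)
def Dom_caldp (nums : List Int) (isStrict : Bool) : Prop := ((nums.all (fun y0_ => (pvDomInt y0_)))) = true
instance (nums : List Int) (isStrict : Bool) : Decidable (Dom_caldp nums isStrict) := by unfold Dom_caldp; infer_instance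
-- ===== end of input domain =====

-- B replaces A's patience-sorting tails array (bisect insertion) by the classic
-- quadratic LIS dynamic program that rescans all earlier elements; same values, no speed claim.

-- ===== PORT A =====
-- bisect_left/bisect_right ported as linear scans computing the insertion point;
-- exact on sorted lists (A only ever bisects its `lis`, which stays sorted).
def bisectLeft : List Int → Int → Nat
  | [], _ => 0
  | t :: r, x => if t < x then bisectLeft r x + 1 else 0

def bisectRight : List Int → Int → Nat
  | [], _ => 0
  | t :: r, x => if t ≤ x then bisectRight r x + 1 else 0

-- the loop of A: on each element compute the bisect position in `lis`,
-- either append (res[i] = new len(lis)) or overwrite (res[i] = pos+1)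
def caldpGo (isStrict : Bool) : List Int → List Int → List Int
  | [], _ => []
  | x :: rest, lis =>
    let pos := if isStrict then bisectLeft lis x else bisectRight lis x
    if pos = lis.length then
      ((lis.length : Int) + 1) :: caldpGo isStrict rest (lis ++ [x])
    else
      ((pos : Int) + 1) :: caldpGo isStrict rest (lis.set pos x)

def caldp (nums : List Int) (isStrict : Bool) : List Int :=
  if nums.isEmpty then [] else caldpGo isStrict nums []

-- ===== PORT B =====
-- the inner loop of B: scan all (value, dp) pairs of earlier elements for the best predecessor
def bestPrev (isStrict : Bool) (x : Int) (prev : List (Int × Int)) : Int :=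
  prev.foldl (fun best p =>
    if (if isStrict then p.1 < x else p.1 ≤ x) && best < p.2 then p.2 else best) 0

def altGo (isStrict : Bool) : List Int → List (Int × Int) → List Int
  | [], _ => []
  | x :: rest, prev =>
    let best := bestPrev isStrict x prev
    (best + 1) :: altGo isStrict rest (prev ++ [(x, best + 1)])

def caldp_alt (nums : List Int) (isStrict : Bool) : List Int :=
  altGo isStrict nums []

-- ===== PRECONDITION & SPEC =====
def Spec_caldp (nums : List Int) (isStrict : Bool) (out : List Int) : Prop := out = caldp_alt nums isStrict
instance (nums : List Int) (isStrict : Bool) (out : List Int) : Decidable (Spec_caldp nums isStrict out) := by unfold Spec_caldp; infer_instance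

-- ===== CLAIM (what is proved, stated in full; the proofs are below) =====
def Claim_equal_caldp : Prop := ∀ (nums : List Int) (isStrict : Bool), Dom_caldp nums isStrict → Spec_caldp nums isStrict (caldp nums isStrict)

-- ===== LEMMAS AND PROOFS =====

-- uniform view of the two bisect scans: position under a boolean predicate
def posP (p : Int → Bool) : List Int → Nat
  | [] => 0
  | t :: r => if p t then posP p r + 1 else 0

-- uniform "can extend" test
def ext (isStrict : Bool) (v x : Int) : Bool := if isStrict then v < x else v ≤ x

lemma bisect_eq_posP (isStrict : Bool) (l : List Int) (x : Int) :
    (if isStrict then bisectLeft l x else bisectRight l x) = posP (fun v => ext isStrict v x) l := by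
  induction l with
  | nil => cases isStrict <;> simp [bisectLeft, bisectRight, posP]
  | cons t r ih =>
    cases isStrict <;> simp_all [bisectLeft, bisectRight, posP, ext]

lemma posP_le_length (p : Int → Bool) (l : List Int) : posP p l ≤ l.length := by
  induction l with
  | nil => simp [posP]
  | cons t r ih => by_cases h : p t <;> simp [posP, h] <;> omega

lemma ext_mono (isStrict : Bool) {a b x : Int} (hab : a ≤ b) (h : ext isStrict b x = true) :
    ext isStrict a x = true := by
  cases isStrict <;> simp_all [ext] <;> omega

-- below position posP, the predicate holds (needs sortedness and downward closure)
lemma posP_lt_sat (isStrict : Bool) (x : Int) :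
    ∀ (l : List Int), l.Pairwise (· ≤ ·) →
      ∀ k, k < posP (fun v => ext isStrict v x) l → ext isStrict (l.getD k 0) x = true := by
  intro l
  induction l with
  | nil => simp [posP]
  | cons t r ih =>
    intro hs k hk
    by_cases ht : ext isStrict t x = true
    · cases k with
      | zero => simpa using ht
      | succ k' =>
        simp only [posP, ht, if_pos] at hk
        simpa using ih (List.Pairwise.of_cons hs) k' (by omega)
    · simp [posP, ht] at hk

-- at and beyond position posP, the predicate fails
lemma posP_ge_fail (isStrict : Bool) (x : Int) :
    ∀ (l : List Int), l.Pairwise (· ≤ ·) →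
      ∀ k, posP (fun v => ext isStrict v x) l ≤ k → k < l.length →
        ext isStrict (l.getD k 0) x = false := by
  intro l
  induction l with
  | nil => simp
  | cons t r ih =>
    intro hs k hk hlen
    by_cases ht : ext isStrict t x = true
    · cases k with
      | zero => simp [posP, ht] at hk
      | succ k' =>
        simp only [posP, ht, if_pos] at hk
        simpa using ih (List.Pairwise.of_cons hs) k' (by omega) (by simpa using hlen)
    · cases k with
      | zero => simpa using eq_false_of_ne_true ht
      | succ k' =>
        -- t fails; r.getD k' 0 ≥ t, so by downward closure it fails too
        have hk' : k' < r.length := by simpa using hlen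
        have hmem : r.getD k' 0 ∈ r := by
          rw [List.getD_eq_getElem _ _ hk']; exact List.getElem_mem hk'
        have hge : t ≤ r.getD k' 0 := (List.pairwise_cons.mp hs).1 _ hmem
        have : ext isStrict (r.getD k' 0) x = false := by
          by_contra h
          exact ht (ext_mono isStrict hge (by simpa using h))
        simpa using this

-- comparisons unfolded
lemma ext_true_le (isStrict : Bool) {v x : Int} (h : ext isStrict v x = true) : v ≤ x := by
  cases isStrict <;> simp_all [ext] <;> omega

lemma ext_false_ge (isStrict : Bool) {v x : Int} (h : ext isStrict v x = false) : x ≤ v := by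
  cases isStrict <;> simp_all [ext] <;> omega

-- getD/set bridges
lemma getD_set_self {l : List Int} {i : Nat} {a : Int} (h : i < l.length) :
    (l.set i a).getD i 0 = a := by
  rw [List.getD_eq_getElem _ _ (by simpa using h)]
  simp [List.getElem_set]

lemma getD_set_ne {l : List Int} {i k : Nat} {a : Int} (h : k < l.length) (hne : k ≠ i) :
    (l.set i a).getD k 0 = l.getD k 0 := by
  rw [List.getD_eq_getElem _ _ (by simpa using h), List.getD_eq_getElem _ _ h]
  rw [List.getElem_set, if_neg (by omega : ¬ i = k)]

lemma getD_append_left {l : List Int} {a : Int} {k : Nat} (h : k < l.length) :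
    (l ++ [a]).getD k 0 = l.getD k 0 := by
  rw [List.getD_eq_getElem _ _ (by simp; omega), List.getD_eq_getElem _ _ h]
  exact List.getElem_append_left h

lemma getD_append_last (l : List Int) (a : Int) :
    (l ++ [a]).getD l.length 0 = a := by
  rw [List.getD_eq_getElem _ _ (by simp)]
  simp

-- fold lemmas for bestPrev (stated via `ext`, definitionally the port's condition)
lemma bestFold_ge_init (isStrict : Bool) (x : Int) :
    ∀ (l : List (Int × Int)) (b : Int),
      b ≤ l.foldl (fun best p => if ext isStrict p.1 x && best < p.2 then p.2 else best) b := by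
  intro l
  induction l with
  | nil => simp
  | cons q r ih =>
    intro b
    simp only [List.foldl_cons]
    refine le_trans ?_ (ih _)
    split
    · rename_i h
      simp only [Bool.and_eq_true, decide_eq_true_eq] at h
      omega
    · exact le_refl b

lemma bestFold_mem (isStrict : Bool) (x : Int) :
    ∀ (l : List (Int × Int)) (b : Int) (p : Int × Int), p ∈ l → ext isStrict p.1 x = true →
      p.2 ≤ l.foldl (fun best q => if ext isStrict q.1 x && best < q.2 then q.2 else best) b := by
  intro l
  induction l with
  | nil => simp
  | cons q r ih =>
    intro b p hp hx
    simp only [List.foldl_cons]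
    rcases List.mem_cons.mp hp with h | h
    · subst h
      refine le_trans ?_ (bestFold_ge_init isStrict x r _)
      split
      · exact le_refl p.2
      · rename_i h
        rw [hx] at h
        have hnb : ¬ (b < p.2) := by simpa using h
        omega
    · exact ih _ p h hx

lemma bestFold_le (isStrict : Bool) (x : Int) (m : Int) :
    ∀ (l : List (Int × Int)) (b : Int), (∀ p ∈ l, ext isStrict p.1 x = true → p.2 ≤ m) → b ≤ m →
      l.foldl (fun best q => if ext isStrict q.1 x && best < q.2 then q.2 else best) b ≤ m := by
  intro l
  induction l with
  | nil => intro b _ hb; simpa using hb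
  | cons q r ih =>
    intro b hall hb
    simp only [List.foldl_cons]
    apply ih _ (fun p hp hx => hall p (List.mem_cons_of_mem _ hp) hx)
    split
    · rename_i h
      simp only [Bool.and_eq_true] at h
      exact hall q List.mem_cons_self h.1
    · exact hb

-- invariant tying A's tails array to B's processed (value, dp) pairs:
-- lis is sorted, each slot k of lis is witnessed by a processed pair with dp = k+1,
-- and every processed pair with dp = k+1 has value ≥ lis[k]
def StInv (isStrict : Bool) (lis : List Int) (prev : List (Int × Int)) : Prop :=
  lis.Pairwise (· ≤ ·) ∧
  (∀ k, k < lis.length → ∃ p ∈ prev, p.2 = (k : Int) + 1 ∧ p.1 = lis.getD k 0) ∧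
  (∀ p ∈ prev, ∃ k, k < lis.length ∧ p.2 = (k : Int) + 1 ∧ lis.getD k 0 ≤ p.1)

lemma bestPrev_eq_fold (isStrict : Bool) (x : Int) (l : List (Int × Int)) :
    bestPrev isStrict x l = l.foldl (fun best q => if ext isStrict q.1 x && best < q.2 then q.2 else best) 0 := rfl

lemma best_eq_pos (isStrict : Bool) (x : Int) (lis : List Int) (prev : List (Int × Int))
    (hinv : StInv isStrict lis prev) :
    bestPrev isStrict x prev = ((posP (fun v => ext isStrict v x) lis : Nat) : Int) := by
  obtain ⟨hsort, hwit, hbound⟩ := hinv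
  set pos := posP (fun v => ext isStrict v x) lis with hpos
  rw [bestPrev_eq_fold]
  apply le_antisymm
  · -- every contributing pair has dp ≤ pos
    apply bestFold_le
    · intro p hp hx
      obtain ⟨k, hk, hk2, hk3⟩ := hbound p hp
      have hkpos : k < pos := by
        by_contra hge
        have hf := posP_ge_fail isStrict x lis hsort k (by omega) hk
        have := ext_mono isStrict hk3 hx
        rw [hf] at this; exact Bool.false_ne_true this
      omega
    · positivity
  · -- if pos > 0, the witness pair for slot pos-1 contributes pos
    rcases Nat.eq_zero_or_pos pos with h0 | hpb
    · rw [h0]; exact_mod_cast bestFold_ge_init isStrict x prev 0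
    · have hlen : pos - 1 < lis.length := by
        have := posP_le_length (fun v => ext isStrict v x) lis
        omega
      obtain ⟨p, hp, hp2, hp1⟩ := hwit (pos - 1) hlen
      have hsat : ext isStrict (lis.getD (pos - 1) 0) x = true :=
        posP_lt_sat isStrict x lis hsort (pos - 1) (by omega)
      have hx : ext isStrict p.1 x = true := by rw [hp1]; exact hsat
      have hmem := bestFold_mem isStrict x prev 0 p hp hx
      have hcast : ((pos - 1 : Nat) : Int) + 1 = (pos : Int) := by omega
      omega

lemma inv_step (isStrict : Bool) (x : Int) (lis : List Int) (prev : List (Int × Int))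
    (hinv : StInv isStrict lis prev) :
    StInv isStrict
      (if posP (fun v => ext isStrict v x) lis = lis.length
        then lis ++ [x] else lis.set (posP (fun v => ext isStrict v x) lis) x)
      (prev ++ [(x, ((posP (fun v => ext isStrict v x) lis : Nat) : Int) + 1)]) := by
  obtain ⟨hsort, hwit, hbound⟩ := hinv
  set pos := posP (fun v => ext isStrict v x) lis with hpos
  have hple : pos ≤ lis.length := posP_le_length _ _
  by_cases hcase : pos = lis.length
  · rw [if_pos hcase]
    refine ⟨?_, ?_, ?_⟩
    · -- sorted: every element of lis is ≤ x
      rw [List.pairwise_append]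
      refine ⟨hsort, by simp, ?_⟩
      intro a ha b hb
      rw [List.mem_singleton] at hb
      rw [hb]
      obtain ⟨k, hk, hak⟩ := List.mem_iff_getElem.mp ha
      have : ext isStrict (lis.getD k 0) x = true :=
        posP_lt_sat isStrict x lis hsort k (by omega)
      rw [List.getD_eq_getElem _ _ hk, hak] at this
      exact ext_true_le isStrict this
    · intro k hk
      simp only [List.length_append, List.length_singleton] at hk
      by_cases hkl : k < lis.length
      · obtain ⟨p, hp, h2, h1⟩ := hwit k hkl
        exact ⟨p, List.mem_append_left _ hp, h2, by rw [h1, getD_append_left hkl]⟩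
      · have hke : k = lis.length := by omega
        refine ⟨(x, ((pos : Nat) : Int) + 1), List.mem_append_right _ (by simp), ?_, ?_⟩
        · simp [hke, hcase]
        · rw [hke, getD_append_last]
    · intro p hp
      rcases List.mem_append.mp hp with h | h
      · obtain ⟨k, hk, h2, h3⟩ := hbound p h
        exact ⟨k, by simp; omega, h2, by rw [getD_append_left hk]; exact h3⟩
      · rw [List.mem_singleton] at h; subst h
        refine ⟨lis.length, by simp, by simp [hcase], ?_⟩
        rw [getD_append_last]
  · rw [if_neg hcase]
    have hplt : pos < lis.length := by omega
    have hxfail : ext isStrict (lis.getD pos 0) x = false :=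
      posP_ge_fail isStrict x lis hsort pos (le_refl _) hplt
    refine ⟨?_, ?_, ?_⟩
    · -- sorted after the overwrite
      rw [List.pairwise_iff_getElem]
      intro i j hi hj hij
      simp only [List.length_set] at hi hj
      have hold := List.pairwise_iff_getElem.mp hsort
      rw [List.getElem_set, List.getElem_set]
      split <;> split
      · omega
      · -- i = pos < j : x ≤ lis[j]
        rename_i h1 h2
        have hf : ext isStrict (lis.getD j 0) x = false :=
          posP_ge_fail isStrict x lis hsort j (by omega) hj
        rw [List.getD_eq_getElem _ _ hj] at hf
        exact ext_false_ge isStrict hf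
      · -- i < j = pos : lis[i] ≤ x
        rename_i h1 h2
        have hs : ext isStrict (lis.getD i 0) x = true :=
          posP_lt_sat isStrict x lis hsort i (by omega)
        rw [List.getD_eq_getElem _ _ hi] at hs
        exact ext_true_le isStrict hs
      · exact hold i j hi hj hij
    · intro k hk
      simp only [List.length_set] at hk
      by_cases hkp : k = pos
      · refine ⟨(x, ((pos : Nat) : Int) + 1), List.mem_append_right _ (by simp), by simp [hkp], ?_⟩
        rw [hkp, getD_set_self hplt]
      · obtain ⟨p, hp, h2, h1⟩ := hwit k hk
        exact ⟨p, List.mem_append_left _ hp, h2, by rw [h1, getD_set_ne hk hkp]⟩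
    · intro p hp
      rcases List.mem_append.mp hp with h | h
      · obtain ⟨k, hk, h2, h3⟩ := hbound p h
        refine ⟨k, by simpa using hk, h2, ?_⟩
        by_cases hkp : k = pos
        · subst hkp
          rw [getD_set_self hplt]
          exact le_trans (ext_false_ge isStrict hxfail) h3
        · rw [getD_set_ne hk hkp]; exact h3
      · rw [List.mem_singleton] at h; subst h
        exact ⟨pos, by simpa using hplt, by simp, by rw [getD_set_self hplt]⟩

lemma go_eq (isStrict : Bool) :
    ∀ (nums : List Int) (lis : List Int) (prev : List (Int × Int)),
      StInv isStrict lis prev → caldpGo isStrict nums lis = altGo isStrict nums prev := by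
  intro nums
  induction nums with
  | nil => intro lis prev _; rfl
  | cons x rest ih =>
    intro lis prev hinv
    have hb := bisect_eq_posP isStrict lis x
    have hbest := best_eq_pos isStrict x lis prev hinv
    have hstep := inv_step isStrict x lis prev hinv
    set pos := posP (fun v => ext isStrict v x) lis with hpos
    simp only [caldpGo, altGo, hb, hbest]
    by_cases hcase : pos = lis.length
    · rw [if_pos hcase, ← hcase]
      exact congrArg _ (ih _ _ (by rwa [if_pos hcase] at hstep))
    · rw [if_neg hcase]
      exact congrArg _ (ih _ _ (by rwa [if_neg hcase] at hstep))

theorem caldp_spec : Claim_equal_caldp := by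
  intro nums isStrict _
  unfold Spec_caldp caldp caldp_alt
  by_cases h : nums.isEmpty
  · rw [if_pos h]
    rw [List.isEmpty_iff.mp h]
    rfl
  · rw [if_neg h]
    exact go_eq isStrict nums [] [] ⟨List.Pairwise.nil, by simp, by simp⟩
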